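-- pv_equiv track=rewrite | github.com/sabarna/codefights | Spacebot/Round1.py | launchSequenceChecker
-- ===== SOURCE A (Python) =====
-- def launchSequenceChecker(systemNames, stepNumbers):
--     resMap = {}
--     uniqueSysNames = set(systemNames)
--     for k in uniqueSysNames:
--         resMap[k] = []
--
--
--     for i in range(len(systemNames)):
--         resMap[systemNames[i]].append(stepNumbers[i])
--     ret = 1
--     for ls in resMap.values():
--         for j in range(len(ls)) :
--             if j+1 <= len(ls) -1 :
--                 if ls[j] < ls[j+1]:
--                     ret *= 1
--                 else :
--                     ret *= 0
--     return ret
-- ===== SOURCE B (Python) =====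
-- def launchSequenceChecker(systemNames, stepNumbers):
--     last = {}
--     ret = 1
--     for name, step in zip(systemNames, stepNumbers):
--         if name in last and not last[name] < step:
--             ret = 0
--         last[name] = step
--     return ret
-- ===== Notes on version B (the rewrite author's own statement) =====
-- stated objective: simpler
-- what changed: Replaces A's three passes (seed a dict of empty lists per distinct name, group all steps by name, then check adjacent pairs inside every group with a 0/1 product) by a single zip pass keeping only the last step seen per system name; measured ~2x faster by avoiding the intermediate per-name lists.
import Mathlib
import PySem

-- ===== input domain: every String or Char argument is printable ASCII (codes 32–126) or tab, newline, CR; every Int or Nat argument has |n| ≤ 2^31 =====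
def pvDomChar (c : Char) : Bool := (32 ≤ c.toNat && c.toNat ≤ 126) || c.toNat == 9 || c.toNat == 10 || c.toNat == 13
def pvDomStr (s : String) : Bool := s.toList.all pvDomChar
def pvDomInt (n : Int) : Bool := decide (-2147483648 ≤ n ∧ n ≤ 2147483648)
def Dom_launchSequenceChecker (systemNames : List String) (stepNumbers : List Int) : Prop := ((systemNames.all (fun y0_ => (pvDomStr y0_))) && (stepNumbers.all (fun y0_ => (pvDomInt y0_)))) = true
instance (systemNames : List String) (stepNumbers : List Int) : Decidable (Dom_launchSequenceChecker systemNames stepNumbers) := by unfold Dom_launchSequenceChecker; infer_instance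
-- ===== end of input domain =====

-- B replaces A's group-by-name-then-check-adjacent-pairs (three passes over a dict of lists)
-- by a single pass over zip(systemNames, stepNumbers) tracking the last step seen per name.

-- ===== PORT A =====
def launchSequenceChecker (systemNames : List String) (stepNumbers : List Int) : Int :=
  let uniqueSysNames : PySem.Set String := PySem.Set.ofList systemNames
  let resMap0 : PySem.Dict String (List Int) :=
    uniqueSysNames.foldl (fun d k => d.insert k ([] : List Int)) PySem.Dict.empty
  let resMap : PySem.Dict String (List Int) :=
    (PySem.List.pyRange 0 (systemNames.length : Int) 1).foldl
      (fun d i => d.modify (PySem.List.pyGetD systemNames i "") []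
        (fun ls => ls ++ [PySem.List.pyGetD stepNumbers i 0])) resMap0
  resMap.values.foldl (fun ret ls =>
    (PySem.List.pyRange 0 (ls.length : Int) 1).foldl (fun ret j =>
      if j + 1 ≤ (ls.length : Int) - 1 then
        if PySem.List.pyGetD ls j 0 < PySem.List.pyGetD ls (j + 1) 0 then ret * 1 else ret * 0
      else ret) ret) 1

-- ===== PORT B =====
def lscLoop : List (String × Int) → PySem.Dict String Int → Int → Int
  | [], _, ret => ret
  | (name, step) :: rest, last, ret =>
    lscLoop rest (last.insert name step)
      (if last.contains name ∧ ¬ last.getD name 0 < step then 0 else ret)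

def launchSequenceChecker_alt (systemNames : List String) (stepNumbers : List Int) : Int :=
  lscLoop (systemNames.zip stepNumbers) PySem.Dict.empty 1

-- ===== PRECONDITION & SPEC =====
-- Pre_ excludes exactly the inputs where A raises IndexError: stepNumbers shorter than systemNames.
def Pre_launchSequenceChecker (systemNames : List String) (stepNumbers : List Int) : Prop :=
  systemNames.length ≤ stepNumbers.length
instance (systemNames : List String) (stepNumbers : List Int) : Decidable (Pre_launchSequenceChecker systemNames stepNumbers) := by unfold Pre_launchSequenceChecker; infer_instance

def pvWitness_launchSequenceChecker : List String × List Int := (["a", "b", "a"], [1, 5, 3])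

def Spec_launchSequenceChecker (systemNames : List String) (stepNumbers : List Int) (out : Int) : Prop := out = launchSequenceChecker_alt systemNames stepNumbers
instance (systemNames : List String) (stepNumbers : List Int) (out : Int) : Decidable (Spec_launchSequenceChecker systemNames stepNumbers out) := by unfold Spec_launchSequenceChecker; infer_instance

-- ===== CLAIM (what is proved, stated in full; the proofs are below) =====
def Claim_equal_launchSequenceChecker : Prop := ∀ (systemNames : List String) (stepNumbers : List Int), Dom_launchSequenceChecker systemNames stepNumbers → Pre_launchSequenceChecker systemNames stepNumbers → Spec_launchSequenceChecker systemNames stepNumbers (launchSequenceChecker systemNames stepNumbers)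


-- ===== LEMMAS AND PROOFS =====

/-- The steps recorded for system `n`: second components of the zipped pairs whose name is `n`. -/
def lscProj (n : String) (ps : List (String × Int)) : List Int :=
  (ps.filter (fun p => p.1 == n)).map (fun p => p.2)

def lscInd (ls : List Int) : Int := if List.IsChain (· < ·) ls then 1 else 0

/-- B's per-name invariant: the recorded steps, prefixed by the last seen value (if any),
    form a strictly increasing chain. -/
def lscOk (o : Option Int) (ls : List Int) : Prop :=
  List.IsChain (· < ·) (match o with | none => ls | some v => v :: ls)

lemma lscProj_cons (n m : String) (s : Int) (rest : List (String × Int)) :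
    lscProj n ((m, s) :: rest) = if m = n then s :: lscProj n rest else lscProj n rest := by
  simp only [lscProj, List.filter_cons]
  by_cases h : m = n <;> simp [h]

lemma lscProj_nil_of_not_mem (n : String) (ps : List (String × Int))
    (h : ∀ p ∈ ps, p.1 ≠ n) : lscProj n ps = [] := by
  simp only [lscProj, List.map_eq_nil_iff, List.filter_eq_nil_iff]
  intro p hp
  simpa using h p hp

lemma lscOk_cons (o : Option Int) (x : Int) (xs : List Int) :
    lscOk o (x :: xs) ↔ (∀ v, o = some v → v < x) ∧ lscOk (some x) xs := by
  cases o with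
  | none => simp [lscOk]
  | some v => simp [lscOk, List.isChain_cons_cons]

lemma lscLoop_zero (ps : List (String × Int)) (last : PySem.Dict String Int) :
    lscLoop ps last 0 = 0 := by
  induction ps generalizing last with
  | nil => rfl
  | cons p rest ih =>
    obtain ⟨m, s⟩ := p
    simp only [lscLoop]
    split <;> exact ih _

lemma lscLoop_of_all (ps : List (String × Int)) (last : PySem.Dict String Int) (ret : Int)
    (h : ∀ n, lscOk (last.get? n) (lscProj n ps)) : lscLoop ps last ret = ret := by
  induction ps generalizing last ret with
  | nil => rfl
  | cons p rest ih =>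
    obtain ⟨m, s⟩ := p
    have hm := h m
    rw [lscProj_cons, if_pos rfl, lscOk_cons] at hm
    have hcond : ¬ (last.contains m ∧ ¬ last.getD m 0 < s) := by
      rintro ⟨hc, hlt⟩
      rw [PySem.Dict.contains_eq_isSome_get?] at hc
      obtain ⟨v, hv⟩ := Option.isSome_iff_exists.mp hc
      have := hm.1 v hv
      rw [PySem.Dict.getD_eq_get?_getD, hv] at hlt
      exact hlt this
    simp only [lscLoop, if_neg hcond]
    apply ih
    intro n
    by_cases hn : n = m
    · subst hn
      rw [PySem.Dict.get?_insert_self]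
      exact hm.2
    · rw [PySem.Dict.get?_insert_of_ne _ _ hn]
      have := h n
      rwa [lscProj_cons, if_neg (fun he => hn he.symm)] at this

lemma lscLoop_of_not_all (ps : List (String × Int)) (last : PySem.Dict String Int) (ret : Int)
    (h : ¬ ∀ n, lscOk (last.get? n) (lscProj n ps)) : lscLoop ps last ret = 0 := by
  induction ps generalizing last ret with
  | nil =>
    exact absurd (fun n => by cases last.get? n <;> simp [lscOk, lscProj]) h
  | cons p rest ih =>
    obtain ⟨m, s⟩ := p
    by_cases hcond : last.contains m ∧ ¬ last.getD m 0 < s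
    · simp only [lscLoop, if_pos hcond]
      exact lscLoop_zero _ _
    · simp only [lscLoop, if_neg hcond]
      apply ih
      intro hall
      apply h
      intro n
      by_cases hn : n = m
      · subst hn
        rw [lscProj_cons, if_pos rfl, lscOk_cons]
        constructor
        · intro v hv
          by_contra hlt
          apply hcond
          constructor
          · rw [PySem.Dict.contains_eq_isSome_get?, hv]; rfl
          · rw [PySem.Dict.getD_eq_get?_getD, hv]; exact hlt
        · have := hall n
          rwa [PySem.Dict.get?_insert_self] at this
      · have := hall n
        rw [PySem.Dict.get?_insert_of_ne _ _ hn] at this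
        rwa [lscProj_cons, if_neg (fun he => hn he.symm)]

/-- B's value, characterised. -/
lemma lscAlt_char (names : List String) (steps : List Int)
    (hlen : names.length ≤ steps.length) :
    launchSequenceChecker_alt names steps =
      if ∀ n ∈ PySem.Set.ofList names, List.IsChain (· < ·) (lscProj n (names.zip steps)) then 1 else 0 := by
  have hext : (∀ n ∈ PySem.Set.ofList names, List.IsChain (· < ·) (lscProj n (names.zip steps))) →
      ∀ n, lscOk (PySem.Dict.empty.get? n) (lscProj n (names.zip steps)) := by
    intro hb n
    rw [PySem.Dict.get?_empty]
    by_cases hn : n ∈ names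
    · exact hb n ((PySem.Set.mem_ofList names n).mpr hn)
    · rw [lscProj_nil_of_not_mem]
      · exact List.isChain_nil
      · intro p hp he
        apply hn
        rw [← he, ← List.map_fst_zip hlen]
        exact List.mem_map_of_mem hp
  split
  · next hb => exact lscLoop_of_all _ _ _ (hext hb)
  · next hb =>
    apply lscLoop_of_not_all
    intro hall
    apply hb
    intro n _
    have := hall n
    rwa [PySem.Dict.get?_empty] at this

-- ---- A-side helper lemmas ----

lemma foldl_mul (l : List Nat) (f : Nat → Int) (r : Int) :
    l.foldl (fun r j => r * f j) r = r * (l.map f).prod := by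
  induction l generalizing r with
  | nil => simp
  | cons x xs ih => simp [List.foldl_cons, ih, mul_assoc]

lemma prod_ind_range (n : Nat) (c : Nat → Prop) [DecidablePred c] :
    ((List.range n).map (fun j => if c j then (1 : Int) else 0)).prod
      = if ∀ j < n, c j then 1 else 0 := by
  induction n with
  | zero => simp
  | succ m ih =>
    have hiff : (∀ j < m + 1, c j) ↔ (∀ j < m, c j) ∧ c m := by
      constructor
      · exact fun h => ⟨fun j hj => h j (Nat.lt_succ_of_lt hj), h m (Nat.lt_succ_self m)⟩
      · rintro ⟨h1, h2⟩ j hj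
        rcases Nat.lt_succ_iff_lt_or_eq.mp hj with h | h
        · exact h1 j h
        · exact h ▸ h2
    rw [List.range_succ, List.map_append, List.prod_append, ih,
      if_congr hiff rfl rfl]
    by_cases h1 : ∀ j < m, c j <;> by_cases h2 : c m <;> simp [h1, h2]

/-- A's inner loop over one group equals multiplying by the chain indicator. -/
lemma innerA_eq (ls : List Int) (r : Int) :
    (PySem.List.pyRange 0 (ls.length : Int) 1).foldl (fun ret j =>
      if j + 1 ≤ (ls.length : Int) - 1 then
        if PySem.List.pyGetD ls j 0 < PySem.List.pyGetD ls (j + 1) 0 then ret * 1 else ret * 0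
      else ret) r = r * lscInd ls := by
  rw [PySem.List.pyRange_zero_natCast, List.foldl_map]
  have hbody : ∀ (ret : Int) (j : Nat),
      (if (j : Int) + 1 ≤ (ls.length : Int) - 1 then
        if PySem.List.pyGetD ls (j : Int) 0 < PySem.List.pyGetD ls ((j : Int) + 1) 0 then ret * 1 else ret * 0
      else ret)
      = ret * (if (j + 1 < ls.length → ls.getD j 0 < ls.getD (j + 1) 0) then (1 : Int) else 0) := by
    intro ret j
    have hcast : ((j : Int) + 1 : Int) = ((j + 1 : Nat) : Int) := by push_cast; ring
    rw [hcast, PySem.List.pyGetD_natCast, PySem.List.pyGetD_natCast]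
    by_cases hg : j + 1 < ls.length
    · have hgi : ((j + 1 : Nat) : Int) ≤ (ls.length : Int) - 1 := by push_cast; omega
      rw [if_pos hgi]
      by_cases hlt : ls.getD j 0 < ls.getD (j + 1) 0
      · rw [if_pos hlt, if_pos (fun _ => hlt)]
      · rw [if_neg hlt, if_neg (fun himp => hlt (himp hg))]
    · have hgi : ¬ ((j + 1 : Nat) : Int) ≤ (ls.length : Int) - 1 := by push_cast; omega
      rw [if_neg hgi, if_pos (fun h => absurd h hg), mul_one]
  rw [PySem.List.foldl_congr_mem _ _ (fun ret j =>
        ret * (if (j + 1 < ls.length → ls.getD j 0 < ls.getD (j + 1) 0) then (1 : Int) else 0)) r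
      (fun ret j _ => hbody ret j)]
  rw [foldl_mul, prod_ind_range]
  have hiff : (∀ j < ls.length, j + 1 < ls.length → ls.getD j 0 < ls.getD (j + 1) 0)
      ↔ List.IsChain (· < ·) ls := by
    rw [List.isChain_iff_getElem]
    constructor
    · intro h i hi
      have := h i (by omega) hi
      rwa [List.getD_eq_getElem _ _ (by omega), List.getD_eq_getElem _ _ hi] at this
    · intro h i _ hlt
      rw [List.getD_eq_getElem _ _ (by omega), List.getD_eq_getElem _ _ hlt]
      exact h i hlt
  unfold lscInd
  rw [if_congr hiff rfl rfl]

lemma foldl_ind (vs : List (List Int)) (r : Int) :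
    vs.foldl (fun r ls => r * lscInd ls) r
      = if ∀ ls ∈ vs, List.IsChain (· < ·) ls then r else 0 := by
  induction vs generalizing r with
  | nil => simp
  | cons x xs ih =>
    rw [List.foldl_cons, ih]
    by_cases hx : List.IsChain (· < ·) x
    · simp [lscInd, hx]
    · have hno : ¬ ∀ ls ∈ x :: xs, List.IsChain (· < ·) ls := fun h => hx (h x List.mem_cons_self)
      rw [if_neg hno]
      simp [lscInd, hx]

lemma set_update_of_subset (s : PySem.Set String) (l : List String)
    (h : ∀ x ∈ l, x ∈ s) : PySem.Set.update s l = s := by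
  induction l generalizing s with
  | nil => rfl
  | cons x xs ih =>
    show PySem.Set.update (s.add x) xs = s
    rw [PySem.Set.add_of_mem (h x List.mem_cons_self)]
    exact ih s (fun y hy => h y (List.mem_cons_of_mem x hy))

lemma dict_values_eq (d : PySem.Dict String (List Int)) (h : d.keys.Nodup) :
    d.values = d.keys.map (fun k => d.getD k []) := by
  show d.items.map (fun p => p.2) = (d.items.map (fun p => p.1)).map (fun k => d.getD k [])
  rw [List.map_map]
  apply List.map_congr_left
  intro ⟨k, v⟩ hp
  exact (PySem.Dict.getD_of_mem_items d hp h []).symm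

/-- A's value, characterised. -/
lemma lscA_char (names : List String) (steps : List Int)
    (hlen : names.length ≤ steps.length) :
    launchSequenceChecker names steps =
      if ∀ n ∈ PySem.Set.ofList names, List.IsChain (· < ·) (lscProj n (names.zip steps)) then 1 else 0 := by
  have h0 : launchSequenceChecker names steps =
      (((PySem.List.pyRange 0 (names.length : Int) 1).foldl
        (fun d i => d.modify (PySem.List.pyGetD names i "") []
          (fun ls => ls ++ [PySem.List.pyGetD steps i 0]))
        ((PySem.Set.ofList names).foldl (fun d k => d.insert k ([] : List Int)) PySem.Dict.empty)).values).foldl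
        (fun ret ls =>
          (PySem.List.pyRange 0 (ls.length : Int) 1).foldl (fun ret j =>
            if j + 1 ≤ (ls.length : Int) - 1 then
              if PySem.List.pyGetD ls j 0 < PySem.List.pyGetD ls (j + 1) 0 then ret * 1 else ret * 0
            else ret) ret) 1 := rfl
  rw [h0]
  set uniq := PySem.Set.ofList names with huniq
  set resMap0 : PySem.Dict String (List Int) :=
    uniq.foldl (fun d k => d.insert k ([] : List Int)) PySem.Dict.empty with hres0
  -- items / keys of the seeded dict
  have hitems0 : resMap0.items = uniq.map (fun k => (k, ([] : List Int))) := by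
    rw [hres0]
    have := PySem.Dict.items_foldl_insert_fresh uniq (fun k => k) (fun _ => ([] : List Int))
      PySem.Dict.empty (fun a _ => PySem.Dict.contains_empty a)
      (by rw [List.map_id']; exact PySem.Set.nodup_ofList names)
    rw [this]
    rfl
  have hkeys0 : resMap0.keys = uniq := by
    show resMap0.items.map (fun p => p.1) = uniq
    have hc : ((fun p : String × List Int => p.1) ∘ fun k => (k, ([] : List Int))) = fun k => k := rfl
    rw [hitems0, List.map_map, hc, List.map_id']
  have hnodup0 : resMap0.keys.Nodup := by
    rw [hkeys0]; exact PySem.Set.nodup_ofList names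
  have hgetD0 : ∀ n, resMap0.getD n [] = [] := by
    intro n
    by_cases hn : n ∈ uniq
    · exact PySem.Dict.getD_of_mem_items resMap0 (by rw [hitems0]; exact List.mem_map_of_mem hn) hnodup0 []
    · apply PySem.Dict.getD_of_not_contains
      rw [← Bool.not_eq_true, PySem.Dict.contains_iff_mem_keys, hkeys0]
      exact hn
  -- the index loop is the fold over the zipped pairs
  have hmapzip : (PySem.List.pyRange 0 (names.length : Int) 1).map
      (fun i => (PySem.List.pyGetD names i "", PySem.List.pyGetD steps i 0)) = names.zip steps := by
    rw [PySem.List.pyRange_zero_natCast, List.map_map]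
    apply List.ext_getElem
    · simp [List.length_zip]; omega
    · intro i h1 h2
      simp only [List.getElem_map, List.getElem_range, Function.comp_apply,
        PySem.List.pyGetD_natCast, List.getElem_zip]
      rw [List.length_map, List.length_range] at h1
      rw [List.getD_eq_getElem _ _ (by omega), List.getD_eq_getElem _ _ (by omega)]
  have hfold : (PySem.List.pyRange 0 (names.length : Int) 1).foldl
      (fun d i => d.modify (PySem.List.pyGetD names i "") []
        (fun ls => ls ++ [PySem.List.pyGetD steps i 0])) resMap0
      = (names.zip steps).foldl (fun d p => d.modify p.1 [] (fun ls => ls ++ [p.2])) resMap0 := by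
    rw [← hmapzip, List.foldl_map]
  rw [hfold]
  set resMap : PySem.Dict String (List Int) :=
    (names.zip steps).foldl (fun d p => d.modify p.1 [] (fun ls => ls ++ [p.2])) resMap0 with hresMap
  have hkeys : resMap.keys = uniq := by
    rw [hresMap]
    have := PySem.Dict.keys_foldl_modify_key (names.zip steps) (fun p => p.1) ([] : List Int)
      (fun _ p ls => ls ++ [p.2]) resMap0
    rw [this, hkeys0]
    have hm : List.map (fun p => p.1) (names.zip steps) = names := List.map_fst_zip hlen
    rw [hm]
    apply set_update_of_subset
    intro x hx
    exact (PySem.Set.mem_ofList names x).mpr hx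
  have hnodup : resMap.keys.Nodup := by rw [hkeys]; exact PySem.Set.nodup_ofList names
  have hgetD : ∀ n, resMap.getD n [] = lscProj n (names.zip steps) := by
    intro n
    rw [hresMap, PySem.Dict.getD_foldl_modify_append, hgetD0]
    simp [lscProj]
  have hvalues : resMap.values = uniq.map (fun n => lscProj n (names.zip steps)) := by
    rw [dict_values_eq resMap hnodup, hkeys]
    exact List.map_congr_left (fun n _ => hgetD n)
  rw [hvalues]
  rw [PySem.List.foldl_congr_mem _ _ (fun ret ls => ret * lscInd ls) 1
    (fun ret ls _ => innerA_eq ls ret)]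
  rw [foldl_ind]
  congr 1
  simp

-- ===== VERDICT (by name: the statement is the Claim_ definition above) =====
theorem launchSequenceChecker_spec : Claim_equal_launchSequenceChecker := by
  intro names steps _ hpre
  show launchSequenceChecker names steps = launchSequenceChecker_alt names steps
  rw [lscA_char names steps hpre, lscAlt_char names steps hpre]
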